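-- pv_equiv track=rewrite | github.com/Underdisc/DigiPenSemesterCurrent | class/mat/345/project/2/calculate.py | existing_words_in_subject
-- ===== SOURCE A (Python) =====
-- def existing_words_in_subject(word_list, subject):
--     existing_words = []
--     for word in word_list:
--         word_exists = 0
--         for element in subject:
--             if(word == element):
--                 word_exists = 1
--         existing_words.append(word_exists)
--     return existing_words
-- ===== SOURCE B (Python) =====
-- def existing_words_in_subject(word_list, subject):
--     # Build an index word -> all positions in word_list, then mark positions
--     # in one pass over subject (instead of rescanning subject per word).
--     index = {}
--     for i, word in enumerate(word_list):
--         index.setdefault(word, []).append(i)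
--     existing_words = [0] * len(word_list)
--     for element in subject:
--         for i in index.get(element, []):
--             existing_words[i] = 1
--     return existing_words
-- ===== Notes on version B (the rewrite author's own statement) =====
-- stated objective: faster
-- what changed: Replaces the per-word rescan of subject by a one-pass dict index from word to its positions in word_list, then a single marking pass over subject.
import Mathlib
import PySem

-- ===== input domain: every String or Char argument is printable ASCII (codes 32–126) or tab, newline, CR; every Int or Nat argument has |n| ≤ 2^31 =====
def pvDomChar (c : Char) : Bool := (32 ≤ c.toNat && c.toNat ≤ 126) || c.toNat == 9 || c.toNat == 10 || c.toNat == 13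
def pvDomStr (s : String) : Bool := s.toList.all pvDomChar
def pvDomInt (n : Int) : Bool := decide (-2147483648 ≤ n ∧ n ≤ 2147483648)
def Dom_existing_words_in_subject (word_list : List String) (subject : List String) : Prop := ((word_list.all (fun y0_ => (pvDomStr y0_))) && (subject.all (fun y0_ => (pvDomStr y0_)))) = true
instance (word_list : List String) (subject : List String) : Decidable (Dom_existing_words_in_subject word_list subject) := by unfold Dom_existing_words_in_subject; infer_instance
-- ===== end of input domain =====

-- B replaces A's per-word rescan of subject by a dict index word -> positions plus one
-- marking pass over subject (objective: faster, asymptotic).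


-- ===== PORT A =====
-- literal transliteration: outer loop appends, inner loop over subject sets word_exists to 1 on a match
def existing_words_in_subject (word_list : List String) (subject : List String) : List Int :=
  word_list.foldl
    (fun existing_words word =>
      existing_words ++ [subject.foldl (fun word_exists element => if word = element then 1 else word_exists) 0])
    []

-- ===== PORT B =====
-- index word -> list of its positions in word_list (Python setdefault(word, []).append(i),
-- exactly Dict.modify word [] (· ++ [i]))
def pvIndexOf (word_list : List String) : PySem.Dict String (List Nat) :=
  word_list.zipIdx.foldl (fun d p => d.modify p.1 [] (fun l => l ++ [p.2])) PySem.Dict.empty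

def existing_words_in_subject_alt (word_list : List String) (subject : List String) : List Int :=
  let index := pvIndexOf word_list
  subject.foldl
    (fun existing_words element =>
      (index.getD element []).foldl (fun ex i => ex.set i 1) existing_words)
    (List.replicate word_list.length 0)

-- ===== PRECONDITION & SPEC =====
def Spec_existing_words_in_subject (word_list : List String) (subject : List String) (out : List Int) : Prop := out = existing_words_in_subject_alt word_list subject
instance (word_list : List String) (subject : List String) (out : List Int) : Decidable (Spec_existing_words_in_subject word_list subject out) := by unfold Spec_existing_words_in_subject; infer_instance

-- ===== CLAIM (what is proved, stated in full; the proofs are below) =====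
def Claim_equal_existing_words_in_subject : Prop := ∀ (word_list : List String) (subject : List String), Dom_existing_words_in_subject word_list subject → Spec_existing_words_in_subject word_list subject (existing_words_in_subject word_list subject)

-- ===== LEMMAS AND PROOFS =====

-- the common characterisation of both results
def pvMark (word_list : List String) (s : List String) : List Int :=
  word_list.map (fun w => if w ∈ s then 1 else 0)

theorem pvMark_length (wl s : List String) : (pvMark wl s).length = wl.length := by
  simp [pvMark]

-- A's inner loop
theorem pvInner (w : String) (s : List String) (x : Int) :
    s.foldl (fun word_exists element => if w = element then 1 else word_exists) x
      = if w ∈ s then 1 else x := by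
  induction s generalizing x with
  | nil => simp
  | cons e s ih =>
    by_cases h : w = e
    · subst h; simp [ih]
    · simp [h, ih]

theorem pvA_eq_acc (wl s : List String) (acc : List Int) :
    wl.foldl
      (fun existing_words word =>
        existing_words ++ [s.foldl (fun word_exists element => if word = element then 1 else word_exists) 0])
      acc = acc ++ pvMark wl s := by
  induction wl generalizing acc with
  | nil => simp [pvMark]
  | cons w wl ih =>
    rw [List.foldl_cons, ih]
    simp [pvMark, pvInner]

theorem pvA_eq (wl s : List String) :
    existing_words_in_subject wl s = pvMark wl s := by
  unfold existing_words_in_subject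
  rw [pvA_eq_acc]
  simp

-- the index lookup: exactly the positions of w in wl
theorem pvIndexOf_getD (wl : List String) (w : String) :
    (pvIndexOf wl).getD w [] = (wl.zipIdx.filter (fun p => p.1 == w)).map (·.2) := by
  simp [pvIndexOf, PySem.Dict.getD_foldl_modify_append, PySem.Dict.getD_empty]

theorem mem_pvIndexOf (wl : List String) (w : String) (i : Nat) :
    i ∈ (pvIndexOf wl).getD w [] ↔ wl[i]? = some w := by
  rw [pvIndexOf_getD]
  simp only [List.mem_map, List.mem_filter]
  constructor
  · rintro ⟨⟨a, j⟩, ⟨hm, he⟩, rfl⟩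
    have ha : a = w := by simpa using he
    subst ha
    exact List.mem_zipIdx_iff_getElem?.1 hm
  · intro h
    exact ⟨(w, i), ⟨List.mem_zipIdx_iff_getElem?.2 (by simpa using h), by simp⟩, rfl⟩

-- folding `set · 1` preserves length and sets exactly the listed indices
theorem pvSetFold_length (idxs : List Nat) (ex : List Int) :
    (idxs.foldl (fun ex i => ex.set i 1) ex).length = ex.length := by
  induction idxs generalizing ex with
  | nil => rfl
  | cons j idxs ih => simp [ih]

theorem pvSetFold_get (idxs : List Nat) (ex : List Int) (i : Nat) (hi : i < ex.length) :
    (idxs.foldl (fun ex i => ex.set i 1) ex)[i]'(by rw [pvSetFold_length]; exact hi)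
      = if i ∈ idxs then 1 else ex[i] := by
  induction idxs generalizing ex with
  | nil => simp
  | cons j idxs ih =>
    simp only [List.foldl_cons]
    rw [ih (ex.set j 1) (by simpa using hi)]
    by_cases hj : i = j
    · subst hj; simp
    · simp [hj, Ne.symm hj]

-- one marking step extends the processed prefix
theorem pvStep (wl : List String) (p : List String) (e : String) :
    ((pvIndexOf wl).getD e []).foldl (fun ex i => ex.set i 1) (pvMark wl p)
      = pvMark wl (p ++ [e]) := by
  apply List.ext_getElem
  · rw [pvSetFold_length, pvMark_length, pvMark_length]
  · intro i h1 h2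
    have hi : i < (pvMark wl p).length := by rwa [pvSetFold_length] at h1
    have hwl : i < wl.length := by simpa [pvMark_length] using hi
    rw [pvSetFold_get _ _ i hi]
    have hget : wl[i]? = some (wl[i]'hwl) := by simp
    by_cases he : wl[i]'hwl = e
    · have : i ∈ (pvIndexOf wl).getD e [] := (mem_pvIndexOf wl e i).2 (by rw [hget, he])
      simp [this, pvMark, he]
    · have : i ∉ (pvIndexOf wl).getD e [] := by
        intro hmem
        exact he (by simpa [hget] using (mem_pvIndexOf wl e i).1 hmem)
      simp [this, pvMark, he]

theorem pvB_loop (wl : List String) (s p : List String) :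
    s.foldl (fun existing_words element =>
        ((pvIndexOf wl).getD element []).foldl (fun ex i => ex.set i 1) existing_words)
      (pvMark wl p) = pvMark wl (p ++ s) := by
  induction s generalizing p with
  | nil => simp
  | cons e s ih =>
    simp only [List.foldl_cons]
    rw [pvStep wl p e, ih (p ++ [e])]
    simp

theorem pvB_eq (wl s : List String) :
    existing_words_in_subject_alt wl s = pvMark wl s := by
  have h0 : List.replicate wl.length (0 : Int) = pvMark wl [] := by
    simp [pvMark, List.map_const']
  show s.foldl _ (List.replicate wl.length 0) = _
  rw [h0]
  simpa using pvB_loop wl s []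

-- ===== VERDICT (by name: the statement is the Claim_ definition above) =====
theorem existing_words_in_subject_spec : Claim_equal_existing_words_in_subject := by
  intro wl s _
  unfold Spec_existing_words_in_subject
  rw [pvA_eq, pvB_eq]
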